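-- pv_equiv track=rewrite | github.com/snir1551/Economic-Algorithms | Ex11/Q1.py | find_trading_cycle
-- ===== SOURCE A (Python) =====
-- from typing import List, Dict
-- from typing import List
-- from collections import deque
--
-- def find_trading_cycle(preferences: List[List[int]]):
--     """
--
--     Finds a trading cycle given a list of preferences.
--     A trading cycle is a sequence of citizens and homes such that each citizen is matched to their
--     most preferred home, and each home is matched to its most preferred citizen.
--
--     :param preferences: A list of lists, where each list represents the preferences of a citizen.
--                       The first element of each list is the most preferred home, the second is the
--                       second most preferred, and so on.
--     :return: A list representing the trading cycle, where the first element is the starting point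
--              of the cycle, and the last element is the starting point.
--
--      Examples:
--
--     >>> preferences = [[1, 2, 0], [2, 0, 1], [0, 1, 2]]
--     >>> find_trading_cycle(preferences)
--     [0, 1, 2, 0]
--     >>> preferences = [[2, 1, 0], [2, 0, 1], [0, 1, 2]]
--     >>> find_trading_cycle(preferences)
--     [0, 2, 0]
--     >>> preferences = [[0, 1, 2], [1, 0, 2], [2, 1, 0]]
--     >>> find_trading_cycle(preferences)
--     [0, 0]
--     >>> preferences = [[2, 1, 0], [2, 1, 0], [2, 1, 0]]
--     >>> find_trading_cycle(preferences)
--     [2, 2]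
--     >>> preferences = [[1, 2, 0], [2, 1, 0], [1, 2, 0]]
--     >>> find_trading_cycle(preferences)
--     [1, 2, 1]
--
--     :param preferences:
--     :return:
--     """
--     # Get the number of citizens
--     n = len(preferences)
--     # Create a set to keep track of matched citizens
--     matched_citizens = set()
--     # Create a deque to store the trading cycle
--     trading_cycle = deque()
--     # Start the algorithm with the first citizen
--     current_citizen = 0
--
--     # Repeat until a citizen is matched to their own home
--     while current_citizen not in matched_citizens:
--         # Add the current citizen to the set of matched citizens
--         matched_citizens.add(current_citizen)
--         # Add the current citizen to the trading cycle
--         trading_cycle.append(current_citizen)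
--         # Get the next citizen in the cycle
--         current_citizen = preferences[current_citizen][0]
--
--     # Find the starting point of the cycle
--     cycle_start = trading_cycle.index(current_citizen)
--     # Convert the deque to a list and slice it to get the cycle
--     trading_cycle = list(trading_cycle)[cycle_start:]
--     # Add the starting point of the cycle to the result
--     trading_cycle.append(trading_cycle[0])
--     # Return the final trading cycle
--     return trading_cycle
-- ===== SOURCE B (Python) =====
-- def find_trading_cycle(preferences):
--     # Floyd's two-pointer cycle detection on the top-preference pointer graph.
--     slow = preferences[0][0]
--     fast = preferences[preferences[0][0]][0]
--     while slow != fast: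
--         slow = preferences[slow][0]
--         fast = preferences[preferences[fast][0]][0]
--     # Find the cycle entry: reset one pointer to the start.
--     p = 0
--     q = slow
--     while p != q:
--         p = preferences[p][0]
--         q = preferences[q][0]
--     # Rebuild the cycle from the entry node.
--     cycle = [p]
--     cur = preferences[p][0]
--     while cur != p:
--         cycle.append(cur)
--         cur = preferences[cur][0]
--     cycle.append(p)
--     return cycle
-- ===== Notes on version B (the rewrite author's own statement) =====
-- stated objective: alternative
-- what changed: Replaced A's visited-set-plus-deque walk (record every node, then list.index and slice out the cycle) by Floyd's two-pointer tortoise-and-hare cycle detection, which keeps only two integer pointers and rebuilds the cycle from its entry node in O(1) extra space.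
import Mathlib
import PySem

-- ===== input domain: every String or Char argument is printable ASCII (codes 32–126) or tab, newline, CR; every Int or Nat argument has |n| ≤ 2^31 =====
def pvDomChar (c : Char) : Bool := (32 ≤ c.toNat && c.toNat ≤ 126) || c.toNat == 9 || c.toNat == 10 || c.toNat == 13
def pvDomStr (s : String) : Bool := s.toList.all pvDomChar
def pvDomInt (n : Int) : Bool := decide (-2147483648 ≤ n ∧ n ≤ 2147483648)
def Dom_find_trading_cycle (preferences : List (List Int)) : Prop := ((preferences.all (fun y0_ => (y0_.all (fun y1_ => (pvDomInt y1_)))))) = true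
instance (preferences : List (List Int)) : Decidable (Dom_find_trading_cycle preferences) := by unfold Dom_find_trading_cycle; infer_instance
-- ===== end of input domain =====

-- B replaces A's visited-set + deque walk by Floyd's two-pointer cycle detection (O(1) extra space);
-- return values agree on Pre_ — neither program mutates its argument.

-- ===== PORT A =====
-- preferences[current][0]; the defaults are never reached under Pre_ (out-of-range access = Python IndexError, excluded there)
def pvStep (preferences : List (List Int)) (c : Int) : Int :=
  PySem.List.pyGetD (PySem.List.pyGetD preferences c []) 0 0

-- the 'while current_citizen not in matched_citizens' loop; fuel 2n+1 suffices under Pre_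
def pvLoopA (preferences : List (List Int)) :
    Nat → PySem.Set Int → List Int → Int → List Int × Int
  | 0, _, cyc, cur => (cyc, cur)
  | fuel+1, matched, cyc, cur =>
    if PySem.Set.contains matched cur then (cyc, cur)
    else pvLoopA preferences fuel (PySem.Set.add matched cur) (cyc ++ [cur]) (pvStep preferences cur)

def find_trading_cycle (preferences : List (List Int)) : List Int :=
  let r := pvLoopA preferences (2 * preferences.length + 1) PySem.Set.empty [] 0
  let cycle_start := (PySem.List.index? r.1 r.2).getD 0
  let trading_cycle := PySem.List.slice r.1 (some (cycle_start : Int)) none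
  trading_cycle ++ [PySem.List.pyGetD trading_cycle 0 0]

-- ===== PORT B =====
-- phase 1: 'while slow != fast' (slow one step, fast two steps)
def pvFloydMeet (preferences : List (List Int)) : Nat → Int → Int → Int
  | 0, slow, _ => slow
  | fuel+1, slow, fast =>
    if slow = fast then slow
    else pvFloydMeet preferences fuel (pvStep preferences slow)
        (pvStep preferences (pvStep preferences fast))

-- phase 2: 'while p != q' (both one step)
def pvFloydEntry (preferences : List (List Int)) : Nat → Int → Int → Int
  | 0, p, _ => p
  | fuel+1, p, q =>
    if p = q then p
    else pvFloydEntry preferences fuel (pvStep preferences p) (pvStep preferences q)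

-- phase 3: 'while cur != p' rebuilding the cycle
def pvBuild (preferences : List (List Int)) (entry : Int) : Nat → List Int → Int → List Int
  | 0, acc, _ => acc
  | fuel+1, acc, cur =>
    if cur = entry then acc ++ [entry]
    else pvBuild preferences entry fuel (acc ++ [cur]) (pvStep preferences cur)

def find_trading_cycle_alt (preferences : List (List Int)) : List Int :=
  let fuel := 2 * preferences.length + 1
  let slow := pvStep preferences 0
  let fast := pvStep preferences slow
  let meet := pvFloydMeet preferences fuel slow fast
  let entry := pvFloydEntry preferences fuel 0 meet
  pvBuild preferences entry fuel [entry] (pvStep preferences entry)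

-- ===== PRECONDITION & SPEC =====
-- the top-preference pointer orbit 0, f 0, f (f 0), … where f = pvStep preferences
def pvX (preferences : List (List Int)) : Nat → Int :=
  fun k => (pvStep preferences)^[k] 0

-- Pre_ is exactly A's domain: the top-choice walk from citizen 0 (which revisits a value within
-- 2n steps) only ever meets nonempty rows through in-range (possibly negative, Python-style) indices.
def Pre_find_trading_cycle (preferences : List (List Int)) : Prop :=
  preferences ≠ [] ∧ ∀ k, k ≤ 2 * preferences.length →
    -(preferences.length : Int) ≤ pvX preferences k ∧
    pvX preferences k < (preferences.length : Int) ∧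
    PySem.List.pyGetD preferences (pvX preferences k) [] ≠ []
instance (preferences : List (List Int)) : Decidable (Pre_find_trading_cycle preferences) := by
  unfold Pre_find_trading_cycle; infer_instance

def pvWitness_find_trading_cycle : List (List Int) := [[1, 2, 0], [2, 0, 1], [0, 1, 2]]

def Spec_find_trading_cycle (preferences : List (List Int)) (out : List Int) : Prop := out = find_trading_cycle_alt preferences
instance (preferences : List (List Int)) (out : List Int) : Decidable (Spec_find_trading_cycle preferences out) := by unfold Spec_find_trading_cycle; infer_instance

-- ===== CLAIM (what is proved, stated in full; the proofs are below) =====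
def Claim_equal_find_trading_cycle : Prop := ∀ (preferences : List (List Int)), Dom_find_trading_cycle preferences → Pre_find_trading_cycle preferences → Spec_find_trading_cycle preferences (find_trading_cycle preferences)

-- ===== LEMMAS AND PROOFS =====

lemma pvX_succ (preferences : List (List Int)) (k : Nat) :
    pvX preferences (k + 1) = pvStep preferences (pvX preferences k) := by
  simp [pvX, Function.iterate_succ_apply']

-- A's loop, characterised at its first revisit index b0
lemma pvLoopA_spec (preferences : List (List Int)) (b0 : Nat)
    (hstop : ∃ a, a < b0 ∧ pvX preferences a = pvX preferences b0)
    (hgo : ∀ k, k < b0 → ∀ a, a < k → pvX preferences a ≠ pvX preferences k) :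
    ∀ fuel k, k ≤ b0 → b0 - k < fuel →
      pvLoopA preferences fuel (PySem.Set.ofList ((List.range k).map (pvX preferences)))
        ((List.range k).map (pvX preferences)) (pvX preferences k)
      = ((List.range b0).map (pvX preferences), pvX preferences b0) := by
  intro fuel
  induction fuel with
  | zero => intro k _ hf; omega
  | succ fuel ih =>
    intro k hk hf
    by_cases hkb : k = b0
    · subst hkb
      obtain ⟨a, ha, hae⟩ := hstop
      have hmem : pvX preferences k ∈ PySem.Set.ofList ((List.range k).map (pvX preferences)) := by
        rw [PySem.Set.mem_ofList]
        exact List.mem_map.mpr ⟨a, List.mem_range.mpr ha, hae⟩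
      rw [pvLoopA, if_pos ((PySem.Set.contains_iff _ _).mpr hmem)]
    · have hklt : k < b0 := lt_of_le_of_ne hk hkb
      have hnmem : pvX preferences k ∉ PySem.Set.ofList ((List.range k).map (pvX preferences)) := by
        rw [PySem.Set.mem_ofList]
        intro hc
        obtain ⟨a, ha, hae⟩ := List.mem_map.mp hc
        exact hgo k hklt a (List.mem_range.mp ha) hae
      rw [pvLoopA, if_neg (by simp [hnmem])]
      have hadd : PySem.Set.add (PySem.Set.ofList ((List.range k).map (pvX preferences)))
          (pvX preferences k)
          = PySem.Set.ofList ((List.range (k+1)).map (pvX preferences)) := by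
        rw [List.range_succ, List.map_append, List.map_singleton,
          PySem.Set.ofList_append_singleton]
      have happ : (List.range k).map (pvX preferences) ++ [pvX preferences k]
          = (List.range (k+1)).map (pvX preferences) := by
        rw [List.range_succ, List.map_append, List.map_singleton]
      rw [hadd, happ, ← pvX_succ]
      exact ih (k+1) hklt (by omega)

-- B's phase-1 loop, characterised at the first meeting index m0
lemma pvFloydMeet_spec (preferences : List (List Int)) (m0 : Nat)
    (hstop : pvX preferences m0 = pvX preferences (2 * m0))
    (hgo : ∀ i, 1 ≤ i → i < m0 → pvX preferences i ≠ pvX preferences (2 * i)) :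
    ∀ fuel i, 1 ≤ i → i ≤ m0 → m0 - i < fuel →
      pvFloydMeet preferences fuel (pvX preferences i) (pvX preferences (2 * i))
        = pvX preferences m0 := by
  intro fuel
  induction fuel with
  | zero => intro i _ _ hf; omega
  | succ fuel ih =>
    intro i hi1 him hf
    by_cases him0 : i = m0
    · subst him0
      rw [pvFloydMeet, if_pos hstop]
    · have hilt : i < m0 := lt_of_le_of_ne him him0
      rw [pvFloydMeet, if_neg (fun hc => hgo i hi1 hilt hc)]
      have h1 : pvStep preferences (pvX preferences i) = pvX preferences (i + 1) :=
        (pvX_succ preferences i).symm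
      have h2 : pvStep preferences (pvStep preferences (pvX preferences (2 * i)))
          = pvX preferences (2 * (i + 1)) := by
        rw [show 2 * (i + 1) = (2 * i + 1) + 1 by omega, pvX_succ, pvX_succ]
      rw [h1, h2]
      exact ih (i+1) (by omega) hilt (by omega)

-- B's phase-2 loop, characterised at the cycle entry mu
lemma pvFloydEntry_spec (preferences : List (List Int)) (m0 mu : Nat)
    (hstop : pvX preferences mu = pvX preferences (m0 + mu))
    (hgo : ∀ j, j < mu → pvX preferences j ≠ pvX preferences (m0 + j)) :
    ∀ fuel j, j ≤ mu → mu - j < fuel →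
      pvFloydEntry preferences fuel (pvX preferences j) (pvX preferences (m0 + j))
        = pvX preferences mu := by
  intro fuel
  induction fuel with
  | zero => intro j _ hf; omega
  | succ fuel ih =>
    intro j hj hf
    by_cases hjm : j = mu
    · subst hjm
      rw [pvFloydEntry, if_pos hstop]
    · have hjlt : j < mu := lt_of_le_of_ne hj hjm
      rw [pvFloydEntry, if_neg (hgo j hjlt)]
      rw [← pvX_succ]
      have h2 : pvStep preferences (pvX preferences (m0 + j)) = pvX preferences (m0 + (j + 1)) := by
        rw [show m0 + (j + 1) = (m0 + j) + 1 from rfl, pvX_succ]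
      rw [h2]
      exact ih (j+1) hjlt (by omega)

-- B's phase-3 loop rebuilding the cycle from the entry node
lemma pvBuild_spec (preferences : List (List Int)) (mu lam : Nat)
    (hstop : pvX preferences (mu + lam) = pvX preferences mu)
    (hgo : ∀ k, 1 ≤ k → k < lam → pvX preferences (mu + k) ≠ pvX preferences mu) :
    ∀ fuel k, 1 ≤ k → k ≤ lam → lam - k < fuel →
      pvBuild preferences (pvX preferences mu) fuel
        ((List.range k).map (fun j => pvX preferences (mu + j))) (pvX preferences (mu + k))
      = (List.range lam).map (fun j => pvX preferences (mu + j)) ++ [pvX preferences mu] := by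
  intro fuel
  induction fuel with
  | zero => intro k _ _ hf; omega
  | succ fuel ih =>
    intro k hk1 hkl hf
    by_cases hke : k = lam
    · subst hke
      rw [pvBuild, if_pos hstop]
    · have hklt : k < lam := lt_of_le_of_ne hkl hke
      rw [pvBuild, if_neg (hgo k hk1 hklt)]
      have happ : (List.range k).map (fun j => pvX preferences (mu + j)) ++ [pvX preferences (mu + k)]
          = (List.range (k+1)).map (fun j => pvX preferences (mu + j)) := by
        rw [List.range_succ, List.map_append, List.map_singleton]
      have hs : pvStep preferences (pvX preferences (mu + k)) = pvX preferences (mu + (k + 1)) := by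
        rw [show mu + (k + 1) = (mu + k) + 1 from rfl, pvX_succ]
      rw [happ, hs]
      exact ih (k+1) (by omega) hklt (by omega)

-- iterating a+b times is iterating b times then a times
lemma pvX_add (preferences : List (List Int)) (a b : Nat) :
    pvX preferences (a + b) = (pvStep preferences)^[a] (pvX preferences b) :=
  Function.iterate_add_apply _ a b 0

-- ===== VERDICT (by name: the statement is the Claim_ definition above) =====
theorem find_trading_cycle_spec : Claim_equal_find_trading_cycle := by
  intro p _ hpre
  unfold Spec_find_trading_cycle
  have hnpos : 0 < p.length := List.length_pos_iff.mpr hpre.1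
  -- pigeonhole: the orbit revisits a value within 2n+1 steps
  have hpig : ∃ b, (∃ a, a < b ∧ pvX p a = pvX p b) ∧ b ≤ 2 * p.length := by
    have hmaps : Set.MapsTo (pvX p) ↑(Finset.range (2 * p.length + 1))
        ↑(Finset.Ico (-(p.length:ℤ)) (p.length:ℤ)) := by
      intro k hk
      simp only [Finset.coe_range, Set.mem_Iio] at hk
      simp only [Finset.coe_Ico, Set.mem_Ico]
      exact ⟨(hpre.2 k (by omega)).1, (hpre.2 k (by omega)).2.1⟩
    have hcard : (Finset.Ico (-(p.length:ℤ)) (p.length:ℤ)).card < (Finset.range (2 * p.length + 1)).card := by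
      simp [Int.card_Ico]
      omega
    obtain ⟨x, hx, y, hy, hxy, hfe⟩ := Finset.exists_ne_map_eq_of_card_lt_of_maps_to hcard hmaps
    simp only [Finset.mem_range] at hx hy
    rcases Nat.lt_or_ge x y with h | h
    · exact ⟨y, ⟨x, h, hfe⟩, by omega⟩
    · exact ⟨x, ⟨y, by omega, hfe.symm⟩, by omega⟩
  haveI : DecidablePred (fun b => ∃ a, a < b ∧ pvX p a = pvX p b) := Classical.decPred _
  have hex : ∃ b, ∃ a, a < b ∧ pvX p a = pvX p b := ⟨hpig.choose, hpig.choose_spec.1⟩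
  -- b0 = first revisit step, mu = cycle entry index, lam = cycle length
  set b0 := Nat.find hex with hb0def
  have hgo : ∀ k, k < b0 → ∀ a, a < k → pvX p a ≠ pvX p k :=
    fun k hk a ha h => Nat.find_min hex hk ⟨a, ha, h⟩
  have hb0n : b0 ≤ 2 * p.length :=
    le_trans (Nat.find_min' hex hpig.choose_spec.1) hpig.choose_spec.2
  obtain ⟨mu, hmub0, hmueq⟩ := Nat.find_spec hex
  set lam := b0 - mu with hlamdef
  have hlam1 : 1 ≤ lam := by omega
  have hb0eq : b0 = mu + lam := by omega
  -- periodicity with period lam from index mu on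
  have hper : ∀ k, mu ≤ k → pvX p (k + lam) = pvX p k := by
    intro k hk
    have h1 : pvX p (k + lam) = (pvStep p)^[k - mu] (pvX p (mu + lam)) := by
      rw [← pvX_add]; congr 1; omega
    have h2 : pvX p (mu + lam) = pvX p mu := by rw [← hb0eq]; exact hmueq.symm
    have h3 : (pvStep p)^[k - mu] (pvX p mu) = pvX p k := by
      rw [← pvX_add]; congr 1; omega
    rw [h1, h2, h3]
  have hperT : ∀ t k, mu ≤ k → pvX p (k + t * lam) = pvX p k := by
    intro t
    induction t with
    | zero => intro k _; simp
    | succ t ih =>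
      intro k hk
      have : k + (t + 1) * lam = (k + lam) + t * lam := by ring
      rw [this, ih (k + lam) (by omega), hper k hk]
  -- reduction of any index ≥ mu into the cycle window [mu, mu+lam)
  have hred : ∀ j, mu ≤ j → pvX p j = pvX p (mu + (j - mu) % lam) := by
    intro j hj
    have hdm := Nat.div_add_mod (j - mu) lam
    have hcomm : lam * ((j - mu) / lam) = ((j - mu) / lam) * lam := Nat.mul_comm _ _
    have hjeq : j = mu + (j - mu) % lam + (j - mu) / lam * lam := by omega
    have h := hperT ((j - mu) / lam) (mu + (j - mu) % lam) (by omega)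
    rw [← hjeq] at h
    exact h
  -- the key structure lemma: any collision lies in the cycle and spans a multiple of lam
  have hkey : ∀ i j, i < j → pvX p i = pvX p j → mu ≤ i ∧ lam ∣ (j - i) := by
    intro i j hij heq
    have hmui : mu ≤ i := by
      by_contra hc
      have hc2 : i < mu := by omega
      rcases Nat.lt_or_ge j b0 with hjb | hjb
      · exact hgo j hjb i hij heq
      · have hj' : pvX p j = pvX p (mu + (j - mu) % lam) := hred j (by omega)
        have hlt : (j - mu) % lam < lam := Nat.mod_lt _ (by omega)
        exact hgo (mu + (j - mu) % lam) (by omega) i (by omega) (heq.trans hj')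
    refine ⟨hmui, ?_⟩
    have hi' : pvX p i = pvX p (mu + (i - mu) % lam) := hred i hmui
    have hj' : pvX p j = pvX p (mu + (j - mu) % lam) := hred j (by omega)
    have hiw : (i - mu) % lam < lam := Nat.mod_lt _ (by omega)
    have hjw : (j - mu) % lam < lam := Nat.mod_lt _ (by omega)
    have heq' : pvX p (mu + (i - mu) % lam) = pvX p (mu + (j - mu) % lam) :=
      (hi'.symm.trans heq).trans hj'
    have hmodeq : (i - mu) % lam = (j - mu) % lam := by
      by_contra hne
      rcases Nat.lt_or_ge ((i - mu) % lam) ((j - mu) % lam) with hl | hl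
      · exact hgo (mu + (j - mu) % lam) (by omega) (mu + (i - mu) % lam) (by omega) heq'
      · have hl' : (j - mu) % lam < (i - mu) % lam := by omega
        exact hgo (mu + (i - mu) % lam) (by omega) (mu + (j - mu) % lam) (by omega) heq'.symm
    have hmm : (i - mu) ≡ (j - mu) [MOD lam] := hmodeq
    have hdvd : lam ∣ (j - mu) - (i - mu) := (Nat.modEq_iff_dvd' (by omega)).mp hmm
    have : (j - mu) - (i - mu) = j - i := by omega
    rwa [this] at hdvd
  -- a meeting point for the hare and the tortoise exists within n steps
  set mstar := lam * (mu / lam + 1) with hmstardef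
  have hdm2 := Nat.div_add_mod mu lam
  have hmul2 : lam * (mu / lam + 1) = lam * (mu / lam) + lam := by ring
  have hmodlt : mu % lam < lam := Nat.mod_lt _ (by omega)
  have hmstar_ge : mu ≤ mstar := by omega
  have hmstar1 : 1 ≤ mstar := by omega
  have hmstar_le : mstar ≤ b0 := by omega
  have hXmstar : 1 ≤ mstar ∧ pvX p mstar = pvX p (2 * mstar) := by
    refine ⟨hmstar1, ?_⟩
    have hcomm : (mu / lam + 1) * lam = lam * (mu / lam + 1) := Nat.mul_comm _ _
    have h2m : 2 * mstar = mstar + (mu / lam + 1) * lam := by omega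
    rw [h2m, hperT (mu / lam + 1) mstar hmstar_ge]
  haveI : DecidablePred (fun m => 1 ≤ m ∧ pvX p m = pvX p (2 * m)) := Classical.decPred _
  have hexQ : ∃ m, 1 ≤ m ∧ pvX p m = pvX p (2 * m) := ⟨mstar, hXmstar⟩
  set m0 := Nat.find hexQ with hm0def
  have hm0 := Nat.find_spec hexQ
  have hm0n : m0 ≤ 2 * p.length := le_trans (le_trans (Nat.find_min' hexQ hXmstar) hmstar_le) hb0n
  have hgoM : ∀ i, 1 ≤ i → i < m0 → pvX p i ≠ pvX p (2 * i) :=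
    fun i h1 hi h => Nat.find_min hexQ hi ⟨h1, h⟩
  -- phase 1 returns X m0
  have hmeet : pvFloydMeet p (2 * p.length + 1) (pvX p 1) (pvX p (2 * 1)) = pvX p m0 :=
    pvFloydMeet_spec p m0 hm0.2 hgoM (2 * p.length + 1) 1 le_rfl hm0.1 (by omega)
  -- m0 is a multiple of lam and at least mu
  obtain ⟨hmum0, t, ht⟩ : mu ≤ m0 ∧ ∃ t, m0 = lam * t := by
    have h := hkey m0 (2 * m0) (by omega) hm0.2
    obtain ⟨h1, h2⟩ := h
    have : 2 * m0 - m0 = m0 := by omega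
    rw [this] at h2
    exact ⟨h1, h2⟩
  -- phase 2 returns X mu
  have hstop2 : pvX p mu = pvX p (m0 + mu) := by
    have hcomm : t * lam = lam * t := Nat.mul_comm _ _
    have : m0 + mu = mu + t * lam := by omega
    rw [this, hperT t mu le_rfl]
  have hgo2 : ∀ j, j < mu → pvX p j ≠ pvX p (m0 + j) := by
    intro j hj heq
    have := (hkey j (m0 + j) (by omega) heq).1
    omega
  have hentry : pvFloydEntry p (2 * p.length + 1) (pvX p 0) (pvX p (m0 + 0)) = pvX p mu :=
    pvFloydEntry_spec p m0 mu hstop2 hgo2 (2 * p.length + 1) 0 (Nat.zero_le _) (by omega)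
  -- phase 3 rebuilds the cycle
  have hstop3 : pvX p (mu + lam) = pvX p mu := hper mu le_rfl
  have hgo3 : ∀ k, 1 ≤ k → k < lam → pvX p (mu + k) ≠ pvX p mu :=
    fun k h1 h2 heq => hgo (mu + k) (by omega) mu (by omega) heq.symm
  have hbuild : pvBuild p (pvX p mu) (2 * p.length + 1)
      ((List.range 1).map (fun j => pvX p (mu + j))) (pvX p (mu + 1))
      = (List.range lam).map (fun j => pvX p (mu + j)) ++ [pvX p mu] :=
    pvBuild_spec p mu lam hstop3 hgo3 (2 * p.length + 1) 1 le_rfl hlam1 (by omega)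
  -- assemble B
  have hacc : (List.range 1).map (fun j => pvX p (mu + j)) = [pvX p mu] := by simp
  have hcur : pvX p (mu + 1) = pvStep p (pvX p mu) := pvX_succ p mu
  rw [hacc, hcur] at hbuild
  have hmeet' : pvFloydMeet p (2 * p.length + 1) (pvStep p 0) (pvStep p (pvStep p 0)) = pvX p m0 :=
    hmeet
  have hentry' : pvFloydEntry p (2 * p.length + 1) 0 (pvX p m0) = pvX p mu := hentry
  have hB : find_trading_cycle_alt p
      = (List.range lam).map (fun j => pvX p (mu + j)) ++ [pvX p mu] := by
    unfold find_trading_cycle_alt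
    simp only [hmeet', hentry', hbuild]
  -- assemble A
  have hloopA : pvLoopA p (2 * p.length + 1) PySem.Set.empty [] 0
      = ((List.range b0).map (pvX p), pvX p b0) :=
    pvLoopA_spec p b0 ⟨mu, hmub0, hmueq⟩ hgo (2 * p.length + 1) 0 (Nat.zero_le _) (by omega)
  -- the trace decomposes as tail ++ cycle
  have hdecomp : (List.range b0).map (pvX p)
      = (List.range mu).map (pvX p) ++ (List.range lam).map (fun j => pvX p (mu + j)) := by
    rw [hb0eq, List.range_add, List.map_append, List.map_map]
    rfl
  have hcyc_cons : (List.range lam).map (fun j => pvX p (mu + j))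
      = pvX p mu :: (List.range (lam - 1)).map (fun j => pvX p (mu + (j + 1))) := by
    conv_lhs => rw [show lam = (lam - 1) + 1 by omega, List.range_succ_eq_map]
    simp [List.map_map, Function.comp_def, Nat.succ_eq_add_one]
  have hidx : PySem.List.index? ((List.range b0).map (pvX p)) (pvX p b0) = some mu := by
    rw [PySem.List.index?_eq_some_iff]
    refine ⟨(List.range mu).map (pvX p),
      (List.range (lam - 1)).map (fun j => pvX p (mu + (j + 1))), ?_, by simp, ?_⟩
    · rw [hdecomp, hcyc_cons, hmueq]
    · intro hmem
      obtain ⟨a, ha, hae⟩ := List.mem_map.mp hmem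
      exact hgo mu hmub0 a (List.mem_range.mp ha) (hae.trans hmueq.symm)
  have hslice : PySem.List.slice ((List.range b0).map (pvX p)) (some ((mu : Nat) : Int)) none
      = (List.range lam).map (fun j => pvX p (mu + j)) := by
    rw [PySem.List.slice_from_natCast, hdecomp]
    exact List.drop_left' (by simp)
  have hhead : PySem.List.pyGetD ((List.range lam).map (fun j => pvX p (mu + j))) 0 0
      = pvX p mu := by
    rw [PySem.List.pyGetD_zero, hcyc_cons]
    rfl
  have hA : find_trading_cycle p
      = (List.range lam).map (fun j => pvX p (mu + j)) ++ [pvX p mu] := by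
    unfold find_trading_cycle
    simp only [hloopA, hidx, Option.getD_some, hslice, hhead]
  rw [hA, hB]
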